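-- pv_equiv track=rewrite | github.com/Dagvello/Beginner_course | lessons/Knight_move.py | examination
-- ===== SOURCE A (Python) =====
-- def examination(move):
--     """Проверка правильности входных данных"""
--     valid_squares = [f + r for r in '12345678' for f in 'ABCDEFGH']
--     if len(move) != 5:
--         return False
--     if move[:2] not in valid_squares or move[3:] not in valid_squares:
--         return False
--     if move[2] != '-':
--         return False
--     return True
-- ===== SOURCE B (Python) =====
-- def examination(move):
--     """Проверка правильности входных данных"""
--     if len(move) != 5:
--         return False
--     return (move[0] in 'ABCDEFGH' and move[1] in '12345678'
--             and move[2] == '-'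
--             and move[3] in 'ABCDEFGH' and move[4] in '12345678')
-- ===== Notes on version B (the rewrite author's own statement) =====
-- stated objective: simpler
-- what changed: Replaces the 64-element valid_squares table and two list-membership scans by direct per-character file/rank range checks after the length guard.
import Mathlib
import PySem

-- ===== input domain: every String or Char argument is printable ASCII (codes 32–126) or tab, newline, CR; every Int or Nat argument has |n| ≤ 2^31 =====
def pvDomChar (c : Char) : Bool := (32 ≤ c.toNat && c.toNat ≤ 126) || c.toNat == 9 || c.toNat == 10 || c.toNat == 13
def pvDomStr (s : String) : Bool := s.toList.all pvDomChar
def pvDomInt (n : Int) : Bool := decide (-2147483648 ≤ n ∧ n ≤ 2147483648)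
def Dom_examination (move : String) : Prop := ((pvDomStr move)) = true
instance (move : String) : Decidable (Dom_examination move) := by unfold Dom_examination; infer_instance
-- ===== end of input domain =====

-- B replaces A's 64-element valid_squares table and membership scans with direct
-- per-character file/rank checks; objective: simpler.


-- ===== PORT A =====
def examination (move : String) : Bool :=
  let valid_squares : List String :=
    "12345678".toList.flatMap (fun r => "ABCDEFGH".toList.map (fun f => String.ofList [f, r]))
  if move.toList.length ≠ 5 then false
  else if ¬ (String.ofList (PySem.List.slice move.toList none (some 2)) ∈ valid_squares)
          ∨ ¬ (String.ofList (PySem.List.slice move.toList (some 3) none) ∈ valid_squares) then false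
  else if PySem.List.pyGet? move.toList 2 ≠ some '-' then false
  else true

-- ===== PORT B =====
def examination_alt (move : String) : Bool :=
  let l := move.toList
  if l.length ≠ 5 then false
  else
    (PySem.List.pyGet? l 0).any (fun c => c ∈ "ABCDEFGH".toList) &&
    (PySem.List.pyGet? l 1).any (fun c => c ∈ "12345678".toList) &&
    (PySem.List.pyGet? l 2 == some '-') &&
    (PySem.List.pyGet? l 3).any (fun c => c ∈ "ABCDEFGH".toList) &&
    (PySem.List.pyGet? l 4).any (fun c => c ∈ "12345678".toList)

-- ===== PRECONDITION & SPEC =====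
def Spec_examination (move : String) (out : Bool) : Prop := out = examination_alt move
instance (move : String) (out : Bool) : Decidable (Spec_examination move out) := by unfold Spec_examination; infer_instance

-- ===== CLAIM (what is proved, stated in full; the proofs are below) =====
def Claim_equal_examination : Prop := ∀ (move : String), Dom_examination move → Spec_examination move (examination move)

-- ===== LEMMAS AND PROOFS =====

theorem mem_valid_squares (f r : Char) :
    (String.ofList [f, r] ∈
      "12345678".toList.flatMap (fun r => "ABCDEFGH".toList.map (fun f => String.ofList [f, r])))
      ↔ (f ∈ "ABCDEFGH".toList ∧ r ∈ "12345678".toList) := by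
  constructor
  · intro h
    rw [List.mem_flatMap] at h
    obtain ⟨r', hr', h⟩ := h
    rw [List.mem_map] at h
    obtain ⟨f', hf', h⟩ := h
    have : ([f, r] : List Char) = [f', r'] := by
      have := congrArg String.toList h
      simpa using this.symm
    simp at this
    exact ⟨this.1 ▸ hf', this.2 ▸ hr'⟩
  · rintro ⟨hf, hr⟩
    rw [List.mem_flatMap]
    exact ⟨r, hr, List.mem_map.mpr ⟨f, hf, rfl⟩⟩

set_option maxHeartbeats 1000000 in
theorem exam_eq (move : String) : examination move = examination_alt move := by
  unfold examination examination_alt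
  by_cases hlen : move.toList.length = 5
  · rcases h : move.toList with _ | ⟨a, _ | ⟨b, _ | ⟨c, _ | ⟨d, _ | ⟨e, _ | ⟨f, t⟩⟩⟩⟩⟩⟩ <;>
      rw [h] at hlen <;> simp only [List.length_nil, List.length_cons] at hlen <;>
      try omega
    have hs1 : PySem.List.slice [a, b, c, d, e] none (some 2) = [a, b] := by
      simp [PySem.List.slice, PySem.List.clampIdx]
    have hs2 : PySem.List.slice [a, b, c, d, e] (some 3) none = [d, e] := by
      simp [PySem.List.slice, PySem.List.clampIdx]
    rw [Bool.eq_iff_iff]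
    simp only [hs1, hs2, mem_valid_squares]
    generalize "ABCDEFGH".toList = F
    generalize "12345678".toList = R
    simp [PySem.List.pyGet?, PySem.List.pyIdx?]
    tauto
  · simp only [ne_eq, hlen, not_false_eq_true, if_true]

-- ===== VERDICT (by name: the statement is the Claim_ definition above) =====
theorem examination_spec : Claim_equal_examination := by
  intro move _
  unfold Spec_examination
  exact exam_eq move
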